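-- pv_equiv track=rewrite | github.com/sparkshail/IDTMC-SystemsBiology | GAL.py | split_by_model
-- ===== SOURCE A (Python) =====
-- def split_by_model(split_intervals, num_splits):
--     new_models = []
--     for i in range(0, num_splits):
--         new_models.append([])
--     cur_index = 0
--
--     for i in range(0,num_splits):
--         line_to_add = []
--         for line in split_intervals:  # the current line
--             for intervals in line: # the intervals
--                 line_to_add.append(intervals[i])
--             new_models[i].append(line_to_add)
--             line_to_add = []
--
--     return new_models
-- ===== SOURCE B (Python) =====
-- def split_by_model(split_intervals, num_splits):
--     # single pass over split_intervals instead of num_splits repeated scans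
--     new_models = [[] for _ in range(num_splits)]
--     for line in split_intervals:
--         buffers = [[] for _ in range(num_splits)]
--         for intervals in line:
--             for i, buf in enumerate(buffers):
--                 buf.append(intervals[i])
--         for model, buf in zip(new_models, buffers):
--             model.append(buf)
--     return new_models
-- ===== Notes on version B (the rewrite author's own statement) =====
-- stated objective: alternative
-- what changed: B makes one pass over split_intervals, building per-line buffers for all split indices at once and appending them to each model via zip, instead of A's outer loop over split indices that rescans all of split_intervals num_splits times.
-- outside the precondition, e.g. on split_by_model([[[1]]], 2): A raises IndexError, B raises IndexError
import Mathlib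
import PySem

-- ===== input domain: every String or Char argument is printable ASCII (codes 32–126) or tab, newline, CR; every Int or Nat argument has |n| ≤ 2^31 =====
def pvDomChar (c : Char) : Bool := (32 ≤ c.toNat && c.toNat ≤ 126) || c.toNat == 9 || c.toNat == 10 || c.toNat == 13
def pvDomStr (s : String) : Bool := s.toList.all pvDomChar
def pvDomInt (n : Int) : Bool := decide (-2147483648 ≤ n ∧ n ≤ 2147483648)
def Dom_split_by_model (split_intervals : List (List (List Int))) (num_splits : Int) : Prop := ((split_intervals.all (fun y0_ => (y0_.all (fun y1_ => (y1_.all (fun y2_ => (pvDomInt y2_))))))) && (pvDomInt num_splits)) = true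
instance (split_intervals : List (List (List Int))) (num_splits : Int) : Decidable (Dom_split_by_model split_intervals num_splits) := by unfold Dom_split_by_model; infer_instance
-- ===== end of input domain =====

-- B restructures A's num_splits scans of split_intervals into a single pass with per-line buffers
-- (objective: alternative). Equivalence about return values; A mutates nothing.

-- ===== PORT A =====
-- A: new_models starts as num_splits empty lists and new_models[i] is filled exactly during
-- iteration i of the second loop, so that loop is a fold appending each completed row in order.
-- intervals[i] (i ≥ 0 always): pyGetD with default 0; Pre_ excludes the out-of-range (IndexError) case.
def split_by_model (split_intervals : List (List (List Int))) (num_splits : Int) : List (List (List Int)) :=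
  (PySem.List.pyRange 0 num_splits 1).foldl
    (fun new_models i =>
      new_models ++
        [split_intervals.foldl
          (fun acc line =>
            acc ++ [line.foldl (fun lta iv => lta ++ [PySem.List.pyGetD iv i 0]) []]) []])
    []

-- ===== PORT B =====
-- B: one pass over split_intervals; per line, buffers built by 'for i, buf in enumerate(buffers)',
-- then zipped onto new_models.
def split_by_model_alt (split_intervals : List (List (List Int))) (num_splits : Int) : List (List (List Int)) :=
  split_intervals.foldl
    (fun new_models line =>
      let buffers :=
        line.foldl
          (fun bufs iv =>
            (PySem.List.enumerate bufs 0).map (fun p => p.2 ++ [PySem.List.pyGetD iv p.1 0]))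
          ((PySem.List.pyRange 0 num_splits 1).map (fun _ => ([] : List Int)))
      List.zipWith (fun model buf => model ++ [buf]) new_models buffers)
    ((PySem.List.pyRange 0 num_splits 1).map (fun _ => ([] : List (List Int))))

-- ===== PRECONDITION & SPEC =====
-- Pre_ excludes exactly the inputs where Python A raises IndexError: some intervals list shorter
-- than num_splits.
def Pre_split_by_model (split_intervals : List (List (List Int))) (num_splits : Int) : Prop :=
  ∀ line ∈ split_intervals, ∀ iv ∈ line, num_splits ≤ (iv.length : Int)
instance (split_intervals : List (List (List Int))) (num_splits : Int) : Decidable (Pre_split_by_model split_intervals num_splits) := by unfold Pre_split_by_model; infer_instance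

def pvWitness_split_by_model : List (List (List Int)) × Int := ([[[1, 2], [3, 4]], [[5, 6]]], 2)

def Spec_split_by_model (split_intervals : List (List (List Int))) (num_splits : Int) (out : List (List (List Int))) : Prop := out = split_by_model_alt split_intervals num_splits
instance (split_intervals : List (List (List Int))) (num_splits : Int) (out : List (List (List Int))) : Decidable (Spec_split_by_model split_intervals num_splits out) := by unfold Spec_split_by_model; infer_instance

-- ===== CLAIM (what is proved, stated in full; the proofs are below) =====
def Claim_equal_split_by_model : Prop := ∀ (split_intervals : List (List (List Int))) (num_splits : Int), Dom_split_by_model split_intervals num_splits → Pre_split_by_model split_intervals num_splits → Spec_split_by_model split_intervals num_splits (split_by_model split_intervals num_splits)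

-- ===== LEMMAS AND PROOFS =====

-- the i-th row of the transpose of one line
def pvRow (line : List (List Int)) (i : Int) : List Int :=
  line.map (fun iv => PySem.List.pyGetD iv i 0)

theorem pvA_closed (si : List (List (List Int))) (n : Int) :
    split_by_model si n =
      (PySem.List.pyRange 0 n 1).map (fun i => si.map (fun line => pvRow line i)) := by
  unfold split_by_model
  rw [PySem.List.foldl_append_singleton_eq_map]
  simp only [List.nil_append, PySem.List.foldl_append_singleton_eq_map, pvRow]

theorem pv_len_range (n : Int) :
    PySem.List.pyRange 0 ((((PySem.List.pyRange 0 n 1).length : Nat) : Int)) 1 =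
      PySem.List.pyRange 0 n 1 := by
  rw [PySem.List.length_pyRange_one]
  by_cases h : n ≤ 0
  · rw [PySem.List.pyRange_one_eq_nil (by omega), PySem.List.pyRange_one_eq_nil h]
  · congr 1; omega

-- one buffers-update step, on a state of the shape R.map f
theorem pv_step (n : Int) (f : Int → List Int) (iv : List Int) :
    (PySem.List.enumerate ((PySem.List.pyRange 0 n 1).map f) 0).map
        (fun p => p.2 ++ [PySem.List.pyGetD iv p.1 0]) =
      (PySem.List.pyRange 0 n 1).map (fun i => f i ++ [PySem.List.pyGetD iv i 0]) := by
  rw [PySem.List.enumerate_eq_map_pyRange _ ([] : List Int)]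
  simp only [PySem.List.len_eq, List.length_map]
  rw [pv_len_range]
  rw [List.map_map]
  apply List.map_congr_left
  intro j hj
  have hj' := (PySem.List.mem_pyRange_one).1 hj
  simp only [Function.comp]
  rw [PySem.List.pyGetD_map_pyRange_of_nonneg f n j ([] : List Int) hj'.1 hj'.2]

-- inner fold over one line, with generalized initial buffers R.map f
theorem pv_inner (n : Int) (line : List (List Int)) (f : Int → List Int) :
    line.foldl
        (fun bufs iv =>
          (PySem.List.enumerate bufs 0).map (fun p => p.2 ++ [PySem.List.pyGetD iv p.1 0]))
        ((PySem.List.pyRange 0 n 1).map f) =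
      (PySem.List.pyRange 0 n 1).map (fun i => f i ++ pvRow line i) := by
  induction line generalizing f with
  | nil => simp [pvRow]
  | cons iv rest ih =>
    simp only [List.foldl_cons]
    rw [pv_step, ih]
    apply List.map_congr_left
    intro j _
    simp [pvRow]

theorem pv_zip_map {α β γ : Type} (g : α → β → γ) (l : List Int) (f1 : Int → α) (f2 : Int → β) :
    List.zipWith g (l.map f1) (l.map f2) = l.map (fun i => g (f1 i) (f2 i)) := by
  induction l with
  | nil => rfl
  | cons x xs ih => simp [ih]

-- outer fold over split_intervals, with generalized accumulator R.map f
theorem pv_outer (n : Int) (si : List (List (List Int))) (f : Int → List (List Int)) :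
    si.foldl
        (fun new_models line =>
          let buffers :=
            line.foldl
              (fun bufs iv =>
                (PySem.List.enumerate bufs 0).map (fun p => p.2 ++ [PySem.List.pyGetD iv p.1 0]))
              ((PySem.List.pyRange 0 n 1).map (fun _ => ([] : List Int)))
          List.zipWith (fun model buf => model ++ [buf]) new_models buffers)
        ((PySem.List.pyRange 0 n 1).map f) =
      (PySem.List.pyRange 0 n 1).map (fun i => f i ++ si.map (fun line => pvRow line i)) := by
  induction si generalizing f with
  | nil => simp
  | cons line rest ih =>
    simp only [List.foldl_cons]
    rw [show (line.foldl
          (fun bufs iv =>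
            (PySem.List.enumerate bufs 0).map (fun p => p.2 ++ [PySem.List.pyGetD iv p.1 0]))
          ((PySem.List.pyRange 0 n 1).map (fun _ => ([] : List Int)))) =
        (PySem.List.pyRange 0 n 1).map (fun i => ([] : List Int) ++ pvRow line i) from pv_inner n line _]
    rw [pv_zip_map, ih]
    apply List.map_congr_left
    intro j _
    simp

theorem pvB_closed (si : List (List (List Int))) (n : Int) :
    split_by_model_alt si n =
      (PySem.List.pyRange 0 n 1).map (fun i => si.map (fun line => pvRow line i)) := by
  unfold split_by_model_alt
  rw [pv_outer n si (fun _ => ([] : List (List Int)))]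
  simp

-- ===== VERDICT (by name: the statement is the Claim_ definition above) =====
theorem split_by_model_spec : Claim_equal_split_by_model := by
  intro si n _ _
  unfold Spec_split_by_model
  rw [pvA_closed, pvB_closed]
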